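-- pv_equiv track=rewrite | github.com/sesh10/Problem-Statements | pythagorean_triplets.py | findPythagoreanTriplets
-- ===== SOURCE A (Python) =====
-- def findPythagoreanTriplets(nums):
--     # Fill this in.
--     list = []
--     list = [x ** 2 for x in nums]
--     for a in list:
--         for b in list:
--             c = a + b
--             if c in list:
--                 return True
--     return False
-- ===== SOURCE B (Python) =====
-- def findPythagoreanTriplets(nums):
--     s = sorted(set(x * x for x in nums))
--     for c in s:
--         l, r = 0, len(s) - 1
--         while l <= r:
--             if s[l] + s[r] == c:
--                 return True
--             if s[l] + s[r] < c:
--                 l += 1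
--             else:
--                 r -= 1
--     return False
-- ===== Notes on version B (the rewrite author's own statement) =====
-- stated objective: faster
-- what changed: B sorts the distinct squares once and, for each candidate square c, runs a converging two-pointer scan over the sorted squares to decide whether two squares sum to c, replacing A's triple-nested linear scans.
import Mathlib
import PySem

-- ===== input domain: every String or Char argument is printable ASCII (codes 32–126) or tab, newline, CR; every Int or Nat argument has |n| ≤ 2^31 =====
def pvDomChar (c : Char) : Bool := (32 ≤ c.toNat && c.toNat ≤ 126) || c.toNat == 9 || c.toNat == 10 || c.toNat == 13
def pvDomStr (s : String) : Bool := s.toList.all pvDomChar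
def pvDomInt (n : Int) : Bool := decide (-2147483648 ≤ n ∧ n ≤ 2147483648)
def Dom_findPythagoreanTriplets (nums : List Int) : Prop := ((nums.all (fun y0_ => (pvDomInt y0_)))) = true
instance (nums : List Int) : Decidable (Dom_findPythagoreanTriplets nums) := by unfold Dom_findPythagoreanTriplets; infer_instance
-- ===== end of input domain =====

-- B replaces A's triple-nested linear scans with sort-distinct-squares + a two-pointer scan per candidate square (objective: faster).

-- ===== PORT A =====
-- A: list of squares, nested loops over it with early return when a+b occurs in the list.
def findPythagoreanTriplets (nums : List Int) : Bool :=
  let list := nums.map (fun x => x ^ 2)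
  list.any (fun a => list.any (fun b => list.contains (a + b)))

-- ===== PORT B =====
-- B's inner while-loop: two pointers l, r converging over the sorted squares, looking for s[l]+s[r] = c.
-- (Python decrements r to -1 and exits via l <= r; with Nat indices that exit is the 'r = 0' branch.)
def pvTwoPtr (s : List Int) (c : Int) (l r : Nat) : Bool :=
  if h : r < l then false
  else
    if s.getD l 0 + s.getD r 0 = c then true
    else if s.getD l 0 + s.getD r 0 < c then pvTwoPtr s c (l + 1) r
    else if r = 0 then false
    else pvTwoPtr s c l (r - 1)
termination_by r + 1 - l
decreasing_by all_goals omega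

-- B: sorted distinct squares, then for each c a two-pointer search.
def findPythagoreanTriplets_alt (nums : List Int) : Bool :=
  let s := PySem.List.sorted (PySem.Set.ofList (nums.map (fun x => x * x))) (fun x => x) false
  s.any (fun c => pvTwoPtr s c 0 (s.length - 1))

-- ===== PRECONDITION & SPEC =====
def Spec_findPythagoreanTriplets (nums : List Int) (out : Bool) : Prop := out = findPythagoreanTriplets_alt nums
instance (nums : List Int) (out : Bool) : Decidable (Spec_findPythagoreanTriplets nums out) := by unfold Spec_findPythagoreanTriplets; infer_instance

-- ===== CLAIM (what is proved, stated in full; the proofs are below) =====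
def Claim_equal_findPythagoreanTriplets : Prop := ∀ (nums : List Int), Dom_findPythagoreanTriplets nums → Spec_findPythagoreanTriplets nums (findPythagoreanTriplets nums)

-- ===== LEMMAS AND PROOFS =====

theorem pv_A_iff (nums : List Int) :
    findPythagoreanTriplets nums = true ↔
      ∃ a ∈ nums.map (fun x => x * x), ∃ b ∈ nums.map (fun x => x * x),
        (a + b) ∈ nums.map (fun x => x * x) := by
  simp [findPythagoreanTriplets, pow_two]

-- Soundness: the two-pointer loop returns true only if some in-window pair sums to c.
theorem pvTwoPtr_sound (s : List Int) :
    ∀ (n l r : Nat) (c : Int), r + 1 - l ≤ n → pvTwoPtr s c l r = true →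
      ∃ i j, l ≤ i ∧ i ≤ j ∧ j ≤ r ∧ s.getD i 0 + s.getD j 0 = c := by
  intro n
  induction n with
  | zero =>
    intro l r c hn h
    rw [pvTwoPtr.eq_def, dif_pos (by omega : r < l)] at h
    simp at h
  | succ n ih =>
    intro l r c hn h
    rw [pvTwoPtr.eq_def] at h
    split_ifs at h with h1 h2 h3 h4
    · exact ⟨l, r, le_refl l, by omega, le_refl r, h2⟩
    · obtain ⟨i, j, a1, a2, a3, a4⟩ := ih (l + 1) r c (by omega) h
      exact ⟨i, j, by omega, a2, a3, a4⟩
    · obtain ⟨i, j, a1, a2, a3, a4⟩ := ih l (r - 1) c (by omega) h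
      exact ⟨i, j, a1, a2, by omega, a4⟩

-- Completeness on a monotone window: if some in-window pair sums to c, the loop finds one.
theorem pvTwoPtr_complete (s : List Int)
    (hmono : ∀ p q, p ≤ q → q < s.length → s.getD p 0 ≤ s.getD q 0) :
    ∀ (n l r : Nat) (c : Int) (i j : Nat), r + 1 - l ≤ n → r < s.length →
      l ≤ i → i ≤ j → j ≤ r → s.getD i 0 + s.getD j 0 = c →
      pvTwoPtr s c l r = true := by
  intro n
  induction n with
  | zero => intro l r c i j hn hr hi hij hj hsum; omega
  | succ n ih =>
    intro l r c i j hn hr hi hij hj hsum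
    rw [pvTwoPtr.eq_def]
    split_ifs with h1 h2 h3 h4
    · omega
    · rfl
    · -- s[l]+s[r] < c : no pair with first index l can work, move l up.
      rcases Nat.lt_or_ge l i with hl | hl
      · exact ih (l + 1) r c i j (by omega) hr hl hij hj hsum
      · exfalso
        have hil : i = l := by omega
        have := hmono j r (by omega) hr
        subst hil; omega
    · -- r = 0 forces i = j = l = r, so s[l]+s[r] = c, contradicting h2.
      exfalso
      have h5 : i = r := by omega
      have h6 : j = r := by omega
      have h7 : l = r := by omega
      subst h5; subst h6; subst h7
      omega
    · -- s[l]+s[r] > c : no pair with second index r can work, move r down.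
      rcases Nat.lt_or_ge j r with hjr | hjr
      · exact ih l (r - 1) c i j (by omega) (by omega) hi hij (by omega) hsum
      · exfalso
        have hjr2 : j = r := by omega
        have := hmono l i hi (by omega)
        subst hjr2; omega

theorem pv_B_iff (nums : List Int) :
    findPythagoreanTriplets_alt nums = true ↔
      ∃ a ∈ nums.map (fun x => x * x), ∃ b ∈ nums.map (fun x => x * x),
        (a + b) ∈ nums.map (fun x => x * x) := by
  unfold findPythagoreanTriplets_alt
  set sq := nums.map (fun x => x * x) with hsq
  set s := PySem.List.sorted (PySem.Set.ofList sq) (fun x => x) false with hs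
  have hmem : ∀ x, x ∈ s ↔ x ∈ sq := by
    intro x
    rw [hs, PySem.List.mem_sorted, PySem.Set.mem_ofList]
  have hmono : ∀ p q, p ≤ q → q < s.length → s.getD p 0 ≤ s.getD q 0 := by
    intro p q hpq hq
    rw [List.getD_eq_getElem s 0 (by omega), List.getD_eq_getElem s 0 hq]
    exact PySem.List.sorted_id_getElem_mono (PySem.Set.ofList sq) hpq hq
  rw [List.any_eq_true]
  constructor
  · rintro ⟨c, hc, htp⟩
    obtain ⟨i, j, -, hij, hjr, hsum⟩ := pvTwoPtr_sound s (s.length - 1 + 1) 0 (s.length - 1) c (by omega) htp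
    have hne : s ≠ [] := List.ne_nil_of_mem hc
    have hlen : 0 < s.length := List.length_pos_iff.mpr hne
    have hj : j < s.length := by omega
    have hi : i < s.length := by omega
    refine ⟨s.getD i 0, ?_, s.getD j 0, ?_, ?_⟩
    · rw [← hmem]; rw [List.getD_eq_getElem s 0 hi]; exact List.getElem_mem hi
    · rw [← hmem]; rw [List.getD_eq_getElem s 0 hj]; exact List.getElem_mem hj
    · rw [hsum, ← hmem]; exact hc
  · rintro ⟨a, ha, b, hb, hab⟩
    refine ⟨a + b, (hmem _).mpr hab, ?_⟩
    obtain ⟨ia, hia, hae⟩ := List.getElem_of_mem ((hmem a).mpr ha)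
    obtain ⟨ib, hib, hbe⟩ := List.getElem_of_mem ((hmem b).mpr hb)
    have hlen : 0 < s.length := by omega
    rcases Nat.le_total ia ib with h | h
    · exact pvTwoPtr_complete s hmono (s.length - 1 + 1) 0 (s.length - 1) (a + b) ia ib
        (by omega) (by omega) (Nat.zero_le _) h (by omega)
        (by rw [List.getD_eq_getElem s 0 hia, List.getD_eq_getElem s 0 hib, hae, hbe])
    · exact pvTwoPtr_complete s hmono (s.length - 1 + 1) 0 (s.length - 1) (a + b) ib ia
        (by omega) (by omega) (Nat.zero_le _) h (by omega)
        (by rw [List.getD_eq_getElem s 0 hib, List.getD_eq_getElem s 0 hia, hae, hbe]; ring)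

-- ===== VERDICT (by name: the statement is the Claim_ definition above) =====
theorem findPythagoreanTriplets_spec : Claim_equal_findPythagoreanTriplets := by
  intro nums _
  unfold Spec_findPythagoreanTriplets
  rw [Bool.eq_iff_iff, pv_A_iff, pv_B_iff]
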